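-- pv_equiv track=rewrite | github.com/GKovanis/Coding-Competitions | Code Jam/Code Jam 2018/CodeJam Round 1A/DatBae.py | questions
-- ===== SOURCE A (Python) =====
-- def questions(line,n):
--     question = []
--     line = str(line)
--     if line == '0':
--         for binary_num in range(n):
--             question.append(binary_num%2)
--     elif line == '1':
--         for binary_num in range(1,n+1):
--             question.append(binary_num%2)
--     elif line == '2':
--         for binary_num in range(n):
--             if (binary_num%4>1):
--                 temp = 0
--             else:
--                 temp = 1
--             question.append(temp)
--     elif line == '3':
--         for binary_num in range(n):
--             if (binary_num%4>1):
--                 temp = 1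
--             else:
--                 temp = 0
--             question.append(temp)
--     elif line =='4':
--         for binary_num in range(n):
--             if (binary_num%3==0):
--                 temp = 1
--             else:
--                 temp = 0
--             question.append(temp)
--     elif line =='5':
--         for binary_num in range(n):
--             if (binary_num%3==0):
--                 temp = 0
--             else:
--                 temp = 1
--             question.append(temp)
--     elif line =='6':
--         for binary_num in range(n):
--             if (binary_num%4==0):
--                 temp = 0
--             else:
--                 temp = 1
--             question.append(temp)
--     elif line =='7':
--         for binary_num in range(n):
--             if (binary_num%4==0):
--                 temp = 1
--             else:
--                 temp = 0
--             question.append(temp)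
--     elif line =='8':
--         for binary_num in range(n):
--             if (binary_num%5==0) or (binary_num%4>1):
--                 temp = 1
--             else:
--                 temp = 0
--             question.append(temp)
--     else:
--         for binary_num in range(n):
--             if (binary_num%5==0) or (binary_num%4>1):
--                 temp = 0
--             else:
--                 temp = 1
--             question.append(temp)
--     question = [str(x) for x in question]
--     question = ''.join(question)
--     return question
-- ===== SOURCE B (Python) =====
-- _TABLE = {
--     '0': '01',
--     '1': '10',
--     '2': '1100',
--     '3': '0011',
--     '4': '100',
--     '5': '011',
--     '6': '0111',
--     '7': '1000',
--     '8': '10110111001100110011',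
-- }
-- _DEFAULT = '01001000110011001100'
--
--
-- def questions(line, n):
--     if n <= 0:
--         return ''
--     base = _TABLE.get(str(line), _DEFAULT)
--     return (base * (n // len(base) + 1))[:n]
-- ===== Notes on version B (the rewrite author's own statement) =====
-- stated objective: simpler
-- what changed: Replaces the ten per-index branch loops by a precomputed period string per pattern (a dict of bases plus a period-20 default), answered by repeat-then-slice (base * (n//len(base)+1))[:n].
import Mathlib
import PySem

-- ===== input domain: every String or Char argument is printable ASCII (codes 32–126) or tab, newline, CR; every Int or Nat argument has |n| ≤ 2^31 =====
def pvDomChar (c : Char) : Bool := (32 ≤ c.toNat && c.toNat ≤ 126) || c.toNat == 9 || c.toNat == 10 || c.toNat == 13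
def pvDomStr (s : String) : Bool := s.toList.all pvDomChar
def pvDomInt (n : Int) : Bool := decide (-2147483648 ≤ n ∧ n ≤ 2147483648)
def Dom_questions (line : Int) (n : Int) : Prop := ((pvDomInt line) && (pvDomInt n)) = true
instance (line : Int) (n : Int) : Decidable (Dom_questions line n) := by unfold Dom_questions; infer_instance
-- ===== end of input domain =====

-- B replaces the ten per-index loops by one precomputed period string per pattern,
-- answered as repeat-then-slice (objective: simpler).

-- ===== PORT A =====
def questions (line : Int) (n : Int) : String :=
  let lineS := PySem.Int.toStr line
  let question : List Int :=
    if lineS = "0" then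
      (PySem.List.pyRange 0 n 1).foldl (fun acc x => acc ++ [PySem.Int.mod x 2]) []
    else if lineS = "1" then
      (PySem.List.pyRange 1 (n+1) 1).foldl (fun acc x => acc ++ [PySem.Int.mod x 2]) []
    else if lineS = "2" then
      (PySem.List.pyRange 0 n 1).foldl (fun acc x => acc ++ [if 1 < PySem.Int.mod x 4 then (0:Int) else 1]) []
    else if lineS = "3" then
      (PySem.List.pyRange 0 n 1).foldl (fun acc x => acc ++ [if 1 < PySem.Int.mod x 4 then (1:Int) else 0]) []
    else if lineS = "4" then
      (PySem.List.pyRange 0 n 1).foldl (fun acc x => acc ++ [if PySem.Int.mod x 3 = 0 then (1:Int) else 0]) []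
    else if lineS = "5" then
      (PySem.List.pyRange 0 n 1).foldl (fun acc x => acc ++ [if PySem.Int.mod x 3 = 0 then (0:Int) else 1]) []
    else if lineS = "6" then
      (PySem.List.pyRange 0 n 1).foldl (fun acc x => acc ++ [if PySem.Int.mod x 4 = 0 then (0:Int) else 1]) []
    else if lineS = "7" then
      (PySem.List.pyRange 0 n 1).foldl (fun acc x => acc ++ [if PySem.Int.mod x 4 = 0 then (1:Int) else 0]) []
    else if lineS = "8" then
      (PySem.List.pyRange 0 n 1).foldl (fun acc x => acc ++ [if PySem.Int.mod x 5 = 0 ∨ 1 < PySem.Int.mod x 4 then (1:Int) else 0]) []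
    else
      (PySem.List.pyRange 0 n 1).foldl (fun acc x => acc ++ [if PySem.Int.mod x 5 = 0 ∨ 1 < PySem.Int.mod x 4 then (0:Int) else 1]) []
  PySem.Str.join "" (question.map (fun x => PySem.Int.toStr x))

-- ===== PORT B =====
-- Source B's module-level dict literal _TABLE (insertion order) and default _DEFAULT
def qTable : PySem.Dict String String := PySem.Dict.mk
  [("0", "01"), ("1", "10"), ("2", "1100"), ("3", "0011"), ("4", "100"),
   ("5", "011"), ("6", "0111"), ("7", "1000"), ("8", "10110111001100110011")]

def qDefault : String := "01001000110011001100"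

def questions_alt (line : Int) (n : Int) : String :=
  if n ≤ 0 then ""
  else
    let base := PySem.Dict.getD qTable (PySem.Int.toStr line) qDefault
    -- Python's 'base * k' (string repetition, k = n // len(base) + 1) ported exactly as
    -- k concatenated copies of the code points; then the slice [:n]
    PySem.Str.slice
      (String.ofList (PySem.List.pyRepeat base.toList (PySem.Int.floordiv n (PySem.Str.len base) + 1)))
      none (some n)

-- ===== PRECONDITION & SPEC =====
def Spec_questions (line : Int) (n : Int) (out : String) : Prop := out = questions_alt line n
instance (line : Int) (n : Int) (out : String) : Decidable (Spec_questions line n out) := by unfold Spec_questions; infer_instance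

-- ===== CLAIM (what is proved, stated in full; the proofs are below) =====
def Claim_equal_questions : Prop := ∀ (line : Int) (n : Int), Dom_questions line n → Spec_questions line n (questions line n)

-- ===== LEMMAS AND PROOFS =====

-- indexing into a flattened replication is indexing into one period
theorem flattenRep_getElem? (L : List Char) :
    ∀ (kn i : Nat), i < kn * L.length → ((List.replicate kn L).flatten)[i]? = L[i % L.length]? := by
  intro kn
  induction kn with
  | zero => intro i h; omega
  | succ k ih =>
    intro i h
    rw [List.replicate_succ, List.flatten_cons]
    by_cases hi : i < L.length
    · rw [List.getElem?_append_left hi, Nat.mod_eq_of_lt hi]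
    · rw [not_lt] at hi
      have hm : (k + 1) * L.length = k * L.length + L.length := by ring
      rw [List.getElem?_append_right hi, ih (i - L.length) (by omega),
        Nat.mod_eq_sub_mod hi]

-- the first m characters of a k-fold repetition of a period L
theorem take_cycle (L : List Char) (hL : 0 < L.length) (m kn : Nat) (h : m ≤ kn * L.length) :
    ((List.replicate kn L).flatten).take m
      = (List.range m).map (fun i => L.getD (i % L.length) '0') := by
  apply List.ext_getElem?
  intro i
  by_cases hi : i < m
  · rw [List.getElem?_take_of_lt hi, flattenRep_getElem? L kn i (by omega),
      List.getElem?_map, List.getElem?_range hi]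
    have hr : i % L.length < L.length := Nat.mod_lt _ hL
    simp [List.getD, List.getElem?_eq_getElem hr]
  · have h1 : (((List.replicate kn L).flatten).take m).length ≤ i := by
      simp [List.length_take]; omega
    have h2 : ((List.range m).map (fun i => L.getD (i % L.length) '0')).length ≤ i := by
      simp; omega
    rw [List.getElem?_eq_none h1, List.getElem?_eq_none h2]

-- A's loop shape: a foldl-append over range, joined with '', is a mapped character list
theorem stringA (a bnd : Int) (fint : Int → Int) (g : Nat → Char)
    (h : ∀ k : Nat, (PySem.Int.toStr (fint (a + (k : Int)))).toList = [g k]) :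
    PySem.Str.join ""
        (((PySem.List.pyRange a bnd 1).foldl (fun acc x => acc ++ [fint x]) []).map
          (fun x => PySem.Int.toStr x))
      = String.ofList ((List.range (bnd - a).toNat).map g) := by
  rw [PySem.List.foldl_append_singleton_eq_map, PySem.List.pyRange_one]
  simp only [List.nil_append, List.map_map, PySem.Str.join]
  congr 1
  have step : List.map (String.toList ∘ (fun x => PySem.Int.toStr x) ∘ fint ∘ fun (k : Nat) => a + (k : Int)) (List.range (bnd - a).toNat)
      = List.map (fun c => [c]) (List.map g (List.range (bnd - a).toNat)) := by
    rw [List.map_map]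
    apply List.map_congr_left
    intro k _
    simpa using h k
  rw [step]
  simpa using PySem.Chars.join_nil_singletons ((List.range (bnd - a).toNat).map g)

-- B's repeat-then-slice shape
theorem stringB (n : Int) (hn : 0 < n) (base : String) (hp : 0 < base.toList.length)
    (hc : n.toNat ≤ (PySem.Int.floordiv n (PySem.Str.len base) + 1).toNat * base.toList.length) :
    PySem.Str.slice
        (String.ofList (PySem.List.pyRepeat base.toList (PySem.Int.floordiv n (PySem.Str.len base) + 1)))
        none (some n)
      = String.ofList ((List.range n.toNat).map (fun i => base.toList.getD (i % base.toList.length) '0')) := by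
  have h1 : (PySem.Str.slice
      (String.ofList (PySem.List.pyRepeat base.toList (PySem.Int.floordiv n (PySem.Str.len base) + 1)))
      none (some n)).toList
      = (PySem.List.pyRepeat base.toList (PySem.Int.floordiv n (PySem.Str.len base) + 1)).take n.toNat := by
    rw [PySem.Str.toList_slice]
    simp only [PySem.Chars.slice_eq_listSlice, String.toList_ofList]
    exact PySem.List.slice_to _ (le_of_lt hn)
  have h2 := congrArg String.ofList h1
  rw [String.ofList_toList] at h2
  rw [h2, PySem.List.pyRepeat]
  exact congrArg String.ofList (take_cycle base.toList hp n.toNat _ hc)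

-- ===== VERDICT (by name: the statement is the Claim_ definition above) =====
set_option maxHeartbeats 4000000 in
theorem questions_spec : Claim_equal_questions := by
  intro line n _
  unfold Spec_questions
  by_cases hn : n ≤ 0
  · have e0 : PySem.List.pyRange 0 n 1 = [] := by
      rw [PySem.List.pyRange_one]; simp; omega
    have e1 : PySem.List.pyRange 1 (n+1) 1 = [] := by
      rw [PySem.List.pyRange_one]; simp; omega
    simp only [questions, questions_alt, e0, e1, List.foldl_nil, if_pos hn]
    split_ifs <;> rfl
  · have hpos : 0 < n := by omega
    simp only [questions, questions_alt, if_neg hn]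
    split_ifs with h0 h1 h2 h3 h4 h5 h6 h7 h8
    · rw [h0]
      rw [show PySem.Dict.getD qTable "0" qDefault = "01" from rfl]
      have hg : ∀ k : Nat, (PySem.Int.toStr (PySem.Int.mod (0 + (k:Int)) 2)).toList
          = [(("01".toList).getD (k % ("01".toList).length) '0')] := by
        intro k
        rw [show ("01".toList).length = 2 from rfl,
          PySem.Int.mod_eq_emod_of_pos (show (0:Int) < 2 by norm_num)]
        set r := k % 2 with hr
        have hrlt : r < 2 := Nat.mod_lt _ (by norm_num)
        rw [show (0 + (k:Int)) % 2 = (r:Int) from by omega]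
        interval_cases r <;> decide
      refine (stringA 0 n (fun x => PySem.Int.mod x 2)
          (fun k => ("01".toList).getD (k % ("01".toList).length) '0') hg).trans ?_
      rw [show n - 0 = n from by ring]
      refine (stringB n hpos "01" (by decide) ?_).symm
      rw [show PySem.Str.len "01" = (2:Int) from rfl,
        PySem.Int.floordiv_eq_ediv_of_pos (by norm_num),
        show ("01".toList).length = 2 from rfl]
      omega
    · rw [h1]
      rw [show PySem.Dict.getD qTable "1" qDefault = "10" from rfl]
      have hg : ∀ k : Nat, (PySem.Int.toStr (PySem.Int.mod (1 + (k:Int)) 2)).toList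
          = [(("10".toList).getD (k % ("10".toList).length) '0')] := by
        intro k
        rw [show ("10".toList).length = 2 from rfl,
          PySem.Int.mod_eq_emod_of_pos (show (0:Int) < 2 by norm_num)]
        set r := k % 2 with hr
        have hrlt : r < 2 := Nat.mod_lt _ (by norm_num)
        rw [show (1 + (k:Int)) % 2 = (((1 + r) % 2 : Nat) : Int) from by omega]
        interval_cases r <;> decide
      refine (stringA 1 (n+1) (fun x => PySem.Int.mod x 2)
          (fun k => ("10".toList).getD (k % ("10".toList).length) '0') hg).trans ?_
      rw [show n + 1 - 1 = n from by ring]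
      refine (stringB n hpos "10" (by decide) ?_).symm
      rw [show PySem.Str.len "10" = (2:Int) from rfl,
        PySem.Int.floordiv_eq_ediv_of_pos (by norm_num),
        show ("10".toList).length = 2 from rfl]
      omega
    · rw [h2]
      rw [show PySem.Dict.getD qTable "2" qDefault = "1100" from rfl]
      have hg : ∀ k : Nat, (PySem.Int.toStr (if 1 < PySem.Int.mod (0 + (k:Int)) 4 then (0:Int) else 1)).toList
          = [(("1100".toList).getD (k % ("1100".toList).length) '0')] := by
        intro k
        rw [show ("1100".toList).length = 4 from rfl,
          PySem.Int.mod_eq_emod_of_pos (show (0:Int) < 4 by norm_num)]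
        set r := k % 4 with hr
        have hrlt : r < 4 := Nat.mod_lt _ (by norm_num)
        rw [show (0 + (k:Int)) % 4 = (r:Int) from by omega]
        interval_cases r <;> decide
      refine (stringA 0 n (fun x => if 1 < PySem.Int.mod x 4 then (0:Int) else 1)
          (fun k => ("1100".toList).getD (k % ("1100".toList).length) '0') hg).trans ?_
      rw [show n - 0 = n from by ring]
      refine (stringB n hpos "1100" (by decide) ?_).symm
      rw [show PySem.Str.len "1100" = (4:Int) from rfl,
        PySem.Int.floordiv_eq_ediv_of_pos (by norm_num),
        show ("1100".toList).length = 4 from rfl]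
      omega
    · rw [h3]
      rw [show PySem.Dict.getD qTable "3" qDefault = "0011" from rfl]
      have hg : ∀ k : Nat, (PySem.Int.toStr (if 1 < PySem.Int.mod (0 + (k:Int)) 4 then (1:Int) else 0)).toList
          = [(("0011".toList).getD (k % ("0011".toList).length) '0')] := by
        intro k
        rw [show ("0011".toList).length = 4 from rfl,
          PySem.Int.mod_eq_emod_of_pos (show (0:Int) < 4 by norm_num)]
        set r := k % 4 with hr
        have hrlt : r < 4 := Nat.mod_lt _ (by norm_num)
        rw [show (0 + (k:Int)) % 4 = (r:Int) from by omega]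
        interval_cases r <;> decide
      refine (stringA 0 n (fun x => if 1 < PySem.Int.mod x 4 then (1:Int) else 0)
          (fun k => ("0011".toList).getD (k % ("0011".toList).length) '0') hg).trans ?_
      rw [show n - 0 = n from by ring]
      refine (stringB n hpos "0011" (by decide) ?_).symm
      rw [show PySem.Str.len "0011" = (4:Int) from rfl,
        PySem.Int.floordiv_eq_ediv_of_pos (by norm_num),
        show ("0011".toList).length = 4 from rfl]
      omega
    · rw [h4]
      rw [show PySem.Dict.getD qTable "4" qDefault = "100" from rfl]
      have hg : ∀ k : Nat, (PySem.Int.toStr (if PySem.Int.mod (0 + (k:Int)) 3 = 0 then (1:Int) else 0)).toList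
          = [(("100".toList).getD (k % ("100".toList).length) '0')] := by
        intro k
        rw [show ("100".toList).length = 3 from rfl,
          PySem.Int.mod_eq_emod_of_pos (show (0:Int) < 3 by norm_num)]
        set r := k % 3 with hr
        have hrlt : r < 3 := Nat.mod_lt _ (by norm_num)
        rw [show (0 + (k:Int)) % 3 = (r:Int) from by omega]
        interval_cases r <;> decide
      refine (stringA 0 n (fun x => if PySem.Int.mod x 3 = 0 then (1:Int) else 0)
          (fun k => ("100".toList).getD (k % ("100".toList).length) '0') hg).trans ?_
      rw [show n - 0 = n from by ring]
      refine (stringB n hpos "100" (by decide) ?_).symm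
      rw [show PySem.Str.len "100" = (3:Int) from rfl,
        PySem.Int.floordiv_eq_ediv_of_pos (by norm_num),
        show ("100".toList).length = 3 from rfl]
      omega
    · rw [h5]
      rw [show PySem.Dict.getD qTable "5" qDefault = "011" from rfl]
      have hg : ∀ k : Nat, (PySem.Int.toStr (if PySem.Int.mod (0 + (k:Int)) 3 = 0 then (0:Int) else 1)).toList
          = [(("011".toList).getD (k % ("011".toList).length) '0')] := by
        intro k
        rw [show ("011".toList).length = 3 from rfl,
          PySem.Int.mod_eq_emod_of_pos (show (0:Int) < 3 by norm_num)]
        set r := k % 3 with hr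
        have hrlt : r < 3 := Nat.mod_lt _ (by norm_num)
        rw [show (0 + (k:Int)) % 3 = (r:Int) from by omega]
        interval_cases r <;> decide
      refine (stringA 0 n (fun x => if PySem.Int.mod x 3 = 0 then (0:Int) else 1)
          (fun k => ("011".toList).getD (k % ("011".toList).length) '0') hg).trans ?_
      rw [show n - 0 = n from by ring]
      refine (stringB n hpos "011" (by decide) ?_).symm
      rw [show PySem.Str.len "011" = (3:Int) from rfl,
        PySem.Int.floordiv_eq_ediv_of_pos (by norm_num),
        show ("011".toList).length = 3 from rfl]
      omega
    · rw [h6]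
      rw [show PySem.Dict.getD qTable "6" qDefault = "0111" from rfl]
      have hg : ∀ k : Nat, (PySem.Int.toStr (if PySem.Int.mod (0 + (k:Int)) 4 = 0 then (0:Int) else 1)).toList
          = [(("0111".toList).getD (k % ("0111".toList).length) '0')] := by
        intro k
        rw [show ("0111".toList).length = 4 from rfl,
          PySem.Int.mod_eq_emod_of_pos (show (0:Int) < 4 by norm_num)]
        set r := k % 4 with hr
        have hrlt : r < 4 := Nat.mod_lt _ (by norm_num)
        rw [show (0 + (k:Int)) % 4 = (r:Int) from by omega]
        interval_cases r <;> decide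
      refine (stringA 0 n (fun x => if PySem.Int.mod x 4 = 0 then (0:Int) else 1)
          (fun k => ("0111".toList).getD (k % ("0111".toList).length) '0') hg).trans ?_
      rw [show n - 0 = n from by ring]
      refine (stringB n hpos "0111" (by decide) ?_).symm
      rw [show PySem.Str.len "0111" = (4:Int) from rfl,
        PySem.Int.floordiv_eq_ediv_of_pos (by norm_num),
        show ("0111".toList).length = 4 from rfl]
      omega
    · rw [h7]
      rw [show PySem.Dict.getD qTable "7" qDefault = "1000" from rfl]
      have hg : ∀ k : Nat, (PySem.Int.toStr (if PySem.Int.mod (0 + (k:Int)) 4 = 0 then (1:Int) else 0)).toList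
          = [(("1000".toList).getD (k % ("1000".toList).length) '0')] := by
        intro k
        rw [show ("1000".toList).length = 4 from rfl,
          PySem.Int.mod_eq_emod_of_pos (show (0:Int) < 4 by norm_num)]
        set r := k % 4 with hr
        have hrlt : r < 4 := Nat.mod_lt _ (by norm_num)
        rw [show (0 + (k:Int)) % 4 = (r:Int) from by omega]
        interval_cases r <;> decide
      refine (stringA 0 n (fun x => if PySem.Int.mod x 4 = 0 then (1:Int) else 0)
          (fun k => ("1000".toList).getD (k % ("1000".toList).length) '0') hg).trans ?_
      rw [show n - 0 = n from by ring]
      refine (stringB n hpos "1000" (by decide) ?_).symm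
      rw [show PySem.Str.len "1000" = (4:Int) from rfl,
        PySem.Int.floordiv_eq_ediv_of_pos (by norm_num),
        show ("1000".toList).length = 4 from rfl]
      omega
    · rw [h8]
      rw [show PySem.Dict.getD qTable "8" qDefault = "10110111001100110011" from rfl]
      have hg : ∀ k : Nat, (PySem.Int.toStr (if PySem.Int.mod (0 + (k:Int)) 5 = 0 ∨ 1 < PySem.Int.mod (0 + (k:Int)) 4 then (1:Int) else 0)).toList
          = [(("10110111001100110011".toList).getD (k % ("10110111001100110011".toList).length) '0')] := by
        intro k
        rw [show ("10110111001100110011".toList).length = 20 from rfl,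
          PySem.Int.mod_eq_emod_of_pos (show (0:Int) < 5 by norm_num),
          PySem.Int.mod_eq_emod_of_pos (show (0:Int) < 4 by norm_num)]
        set r := k % 20 with hr
        have hrlt : r < 20 := Nat.mod_lt _ (by norm_num)
        rw [show (0 + (k:Int)) % 5 = ((r % 5 : Nat) : Int) from by omega]
        rw [show (0 + (k:Int)) % 4 = ((r % 4 : Nat) : Int) from by omega]
        interval_cases r <;> decide
      refine (stringA 0 n (fun x => if PySem.Int.mod x 5 = 0 ∨ 1 < PySem.Int.mod x 4 then (1:Int) else 0)
          (fun k => ("10110111001100110011".toList).getD (k % ("10110111001100110011".toList).length) '0') hg).trans ?_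
      rw [show n - 0 = n from by ring]
      refine (stringB n hpos "10110111001100110011" (by decide) ?_).symm
      rw [show PySem.Str.len "10110111001100110011" = (20:Int) from rfl,
        PySem.Int.floordiv_eq_ediv_of_pos (by norm_num),
        show ("10110111001100110011".toList).length = 20 from rfl]
      omega
    · have hb : PySem.Dict.getD qTable (PySem.Int.toStr line) qDefault = qDefault := by
        simp [qTable, PySem.Dict.getD, PySem.Dict.get?,
          Ne.symm h0, Ne.symm h1, Ne.symm h2, Ne.symm h3, Ne.symm h4,
          Ne.symm h5, Ne.symm h6, Ne.symm h7, Ne.symm h8]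
      rw [hb]
      have hg : ∀ k : Nat, (PySem.Int.toStr (if PySem.Int.mod (0 + (k:Int)) 5 = 0 ∨ 1 < PySem.Int.mod (0 + (k:Int)) 4 then (0:Int) else 1)).toList
          = [((qDefault.toList).getD (k % (qDefault.toList).length) '0')] := by
        intro k
        rw [show (qDefault.toList).length = 20 from rfl,
          PySem.Int.mod_eq_emod_of_pos (show (0:Int) < 5 by norm_num),
          PySem.Int.mod_eq_emod_of_pos (show (0:Int) < 4 by norm_num)]
        set r := k % 20 with hr
        have hrlt : r < 20 := Nat.mod_lt _ (by norm_num)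
        rw [show (0 + (k:Int)) % 5 = ((r % 5 : Nat) : Int) from by omega]
        rw [show (0 + (k:Int)) % 4 = ((r % 4 : Nat) : Int) from by omega]
        interval_cases r <;> decide
      refine (stringA 0 n (fun x => if PySem.Int.mod x 5 = 0 ∨ 1 < PySem.Int.mod x 4 then (0:Int) else 1)
          (fun k => (qDefault.toList).getD (k % (qDefault.toList).length) '0') hg).trans ?_
      rw [show n - 0 = n from by ring]
      refine (stringB n hpos qDefault (by decide) ?_).symm
      rw [show PySem.Str.len qDefault = (20:Int) from rfl,
        PySem.Int.floordiv_eq_ediv_of_pos (by norm_num),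
        show (qDefault.toList).length = 20 from rfl]
      omega
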